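-- pv_equiv track=rewrite | github.com/yahwang/yahwang-algorithm | Etc/PGS_42840.py | solution
-- ===== SOURCE A (Python) =====
-- def solution(answers):
--     answer = []
--     p1 = [1, 2, 3, 4, 5]
--     p2 = [2, 1, 2, 3, 2, 4, 2, 5]
--     p3 = [3, 3, 1, 1, 2, 2, 4, 4, 5, 5]
--     cnt = [0, 0, 0]
--     for idx, quiz in enumerate(answers):
--         if quiz == p1[idx % 5]:
--             cnt[0] += 1
--         if quiz == p2[idx % 8]:
--             cnt[1] += 1
--         if quiz == p3[idx % 10]:
--             cnt[2] += 1
--     max_val = max(cnt)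
--     answer = [i + 1 for i in range(3) if cnt[i] == max_val]
--     return answer
-- ===== SOURCE B (Python) =====
-- def solution(answers):
--     # Histogram keyed by (position mod 40, answer); 40 = lcm of the pattern lengths,
--     # so each pattern's score is 40 table lookups instead of per-element comparisons.
--     hist = {}
--     for i, a in enumerate(answers):
--         k = (i % 40, a)
--         hist[k] = hist.get(k, 0) + 1
--     patterns = [[1, 2, 3, 4, 5],
--                 [2, 1, 2, 3, 2, 4, 2, 5],
--                 [3, 3, 1, 1, 2, 2, 4, 4, 5, 5]]
--     cnt = [sum(hist.get((j, p[j % len(p)]), 0) for j in range(40)) for p in patterns]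
--     max_val = max(cnt)
--     return [i + 1 for i in range(3) if cnt[i] == max_val]
-- ===== Notes on version B (the rewrite author's own statement) =====
-- stated objective: alternative
-- what changed: A compares every answer against each of the three cyclic patterns in one interleaved pass; B builds a histogram dict keyed by (index mod 40, answer) in a single pass with no pattern comparisons, then scores each pattern by 40 table lookups (40 = lcm of the pattern lengths) and selects the maxima.
import Mathlib
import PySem

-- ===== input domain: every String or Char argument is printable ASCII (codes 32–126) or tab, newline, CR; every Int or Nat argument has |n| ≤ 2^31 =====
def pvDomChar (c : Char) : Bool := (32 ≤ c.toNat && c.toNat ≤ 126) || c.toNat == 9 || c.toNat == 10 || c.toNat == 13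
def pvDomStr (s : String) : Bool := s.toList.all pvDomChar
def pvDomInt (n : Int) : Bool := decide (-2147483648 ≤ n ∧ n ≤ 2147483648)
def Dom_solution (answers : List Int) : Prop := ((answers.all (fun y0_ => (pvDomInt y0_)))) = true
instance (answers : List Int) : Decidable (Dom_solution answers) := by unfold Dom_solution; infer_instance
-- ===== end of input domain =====

-- B replaces A's per-element comparisons against the three cyclic patterns by a histogram
-- dict keyed by (index mod 40, answer) built in one comparison-free pass; each pattern is
-- then scored by 40 table lookups (40 = lcm of the pattern lengths). Alternative algorithm,
-- same O(n) cost.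

-- ===== PORT A =====
def solution (answers : List Int) : List Int :=
  let p1 : List Int := [1, 2, 3, 4, 5]
  let p2 : List Int := [2, 1, 2, 3, 2, 4, 2, 5]
  let p3 : List Int := [3, 3, 1, 1, 2, 2, 4, 4, 5, 5]
  let cnt : Int × Int × Int :=
    (PySem.List.enumerate answers).foldl
      (fun (c : Int × Int × Int) (iq : Int × Int) =>
        (if iq.2 = PySem.List.pyGetD p1 (PySem.Int.mod iq.1 5) 0 then c.1 + 1 else c.1,
         if iq.2 = PySem.List.pyGetD p2 (PySem.Int.mod iq.1 8) 0 then c.2.1 + 1 else c.2.1,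
         if iq.2 = PySem.List.pyGetD p3 (PySem.Int.mod iq.1 10) 0 then c.2.2 + 1 else c.2.2))
      (0, 0, 0)
  let maxVal : Int := max (max cnt.1 cnt.2.1) cnt.2.2
  (if cnt.1 = maxVal then [1] else []) ++
    (if cnt.2.1 = maxVal then [2] else []) ++
    (if cnt.2.2 = maxVal then [3] else [])

-- ===== PORT B =====
def solution_alt (answers : List Int) : List Int :=
  let hist : PySem.Dict (Int × Int) Int :=
    (PySem.List.enumerate answers).foldl
      (fun d q => d.modify (PySem.Int.mod q.1 40, q.2) 0 (· + 1)) PySem.Dict.empty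
  let patterns : List (List Int) :=
    [[1, 2, 3, 4, 5], [2, 1, 2, 3, 2, 4, 2, 5], [3, 3, 1, 1, 2, 2, 4, 4, 5, 5]]
  let cnt : List Int := patterns.map (fun p =>
    ((PySem.List.pyRange 0 40 1).map
        (fun j => hist.getD (j, PySem.List.pyGetD p (PySem.Int.mod j (p.length : Int)) 0) 0)).sum)
  let maxVal : Int := (PySem.List.max? cnt (fun y => y)).getD 0
  (PySem.List.pyRange 0 3 1).foldl
    (fun (acc : List Int) (i : Int) =>
      if PySem.List.pyGetD cnt i 0 = maxVal then acc ++ [i + 1] else acc)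
    []

-- ===== PRECONDITION & SPEC =====
def Spec_solution (answers : List Int) (out : List Int) : Prop := out = solution_alt answers
instance (answers : List Int) (out : List Int) : Decidable (Spec_solution answers out) := by unfold Spec_solution; infer_instance

-- ===== CLAIM =====
def Claim_equal_solution : Prop := ∀ (answers : List Int), Dom_solution answers → Spec_solution answers (solution answers)

-- ===== LEMMAS AND PROOFS =====

-- A's triple-accumulator fold splits into three independent folds.
theorem foldl_prod3_split (f g h : Int → (Int × Int) → Int) :
    ∀ (l : List (Int × Int)) (a b c : Int),
      l.foldl (fun (c' : Int × Int × Int) (x : Int × Int) =>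
        (f c'.1 x, g c'.2.1 x, h c'.2.2 x)) (a, b, c) =
      (l.foldl f a, l.foldl g b, l.foldl h c) := by
  intro l
  induction l with
  | nil => intro a b c; rfl
  | cons x t ih => intro a b c; simpa [List.foldl] using ih (f a x) (g b x) (h c x)

-- pointwise sum splits a summed map
theorem pv_sum_map_add {α : Type} (f g : α → Int) :
    ∀ (l : List α), (l.map (fun x => f x + g x)).sum = (l.map f).sum + (l.map g).sum := by
  intro l
  induction l with
  | nil => simp
  | cons x t ih => simp [List.sum_cons, ih]; ring

set_option maxHeartbeats 1000000 in
theorem pv_sum_delta (v : Int → Int) (r x : Int) (h0 : 0 ≤ r) (h1 : r < 40) :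
    ((PySem.List.pyRange 0 40 1).map (fun j => if r = j ∧ x = v j then (1 : Int) else 0)).sum
      = if x = v r then 1 else 0 := by
  have hR : PySem.List.pyRange 0 40 1 =
      [0,1,2,3,4,5,6,7,8,9,10,11,12,13,14,15,16,17,18,19,20,21,22,23,24,25,26,27,28,29,
       30,31,32,33,34,35,36,37,38,39] := by decide
  rw [hR]
  interval_cases r <;> simp

theorem pv_getD_hist :
    ∀ (L : List (Int × Int)) (d : PySem.Dict (Int × Int) Int) (k : Int × Int),
      (L.foldl (fun d q => d.modify (PySem.Int.mod q.1 40, q.2) 0 (· + 1)) d).getD k 0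
        = d.getD k 0 + ((L.map (fun q => (PySem.Int.mod q.1 40, q.2))).count k : Int) := by
  intro L
  induction L with
  | nil => intro d k; simp
  | cons q t ih =>
      intro d k
      simp only [List.foldl_cons, List.map_cons]
      rw [ih, PySem.Dict.getD_modify, List.count_cons]
      push_cast [beq_iff_eq]
      by_cases h : k = (PySem.Int.mod q.1 40, q.2)
      · subst h
        rw [if_pos rfl, if_pos rfl]
        ring
      · rw [if_neg h, if_neg (fun hh => h hh.symm)]
        ring

theorem pv_score_eq (v : Int → Int) :
    ∀ (L : List (Int × Int)) (c : Int),
      L.foldl (fun s q => if q.2 = v (PySem.Int.mod q.1 40) then s + 1 else s) c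
        = c + ((PySem.List.pyRange 0 40 1).map
            (fun j => ((L.map (fun q => (PySem.Int.mod q.1 40, q.2))).count (j, v j) : Int))).sum := by
  intro L
  induction L with
  | nil => intro c; simp
  | cons q t ih =>
      intro c
      simp only [List.foldl_cons, List.map_cons]
      rw [ih]
      have hr0 : 0 ≤ PySem.Int.mod q.1 40 := by
        rw [PySem.Int.mod_eq_emod_of_pos (by norm_num)]
        exact Int.emod_nonneg _ (by norm_num)
      have hr1 : PySem.Int.mod q.1 40 < 40 := by
        rw [PySem.Int.mod_eq_emod_of_pos (by norm_num)]
        exact Int.emod_lt_of_pos _ (by norm_num)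
      have hcnt : ∀ j : Int,
          ((((PySem.Int.mod q.1 40, q.2) :: t.map (fun q => (PySem.Int.mod q.1 40, q.2))).count
              (j, v j) : Nat) : Int)
            = ((t.map (fun q => (PySem.Int.mod q.1 40, q.2))).count (j, v j) : Int)
              + (if PySem.Int.mod q.1 40 = j ∧ q.2 = v j then (1 : Int) else 0) := by
        intro j
        rw [List.count_cons]
        push_cast [beq_iff_eq, Prod.mk.injEq]
        rfl
      rw [show ((PySem.List.pyRange 0 40 1).map
            (fun j => ((((PySem.Int.mod q.1 40, q.2) ::
                t.map (fun q => (PySem.Int.mod q.1 40, q.2))).count (j, v j) : Nat) : Int)))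
          = ((PySem.List.pyRange 0 40 1).map
            (fun j => ((t.map (fun q => (PySem.Int.mod q.1 40, q.2))).count (j, v j) : Int)
              + (if PySem.Int.mod q.1 40 = j ∧ q.2 = v j then (1 : Int) else 0))) from
          List.map_congr_left (fun j _ => hcnt j)]
      rw [pv_sum_map_add, pv_sum_delta v _ q.2 hr0 hr1]
      split_ifs <;> ring

-- taking the index mod 40 first does not change the index into a pattern of length dividing 40
theorem pv_mod_mod_40 (m i : Int) (hm : 0 < m) (hd : m ∣ 40) :
    PySem.Int.mod (PySem.Int.mod i 40) m = PySem.Int.mod i m := by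
  rw [PySem.Int.mod_eq_emod_of_pos (by norm_num : (0:Int) < 40),
      PySem.Int.mod_eq_emod_of_pos hm, PySem.Int.mod_eq_emod_of_pos hm,
      Int.emod_emod_of_dvd _ hd]

-- with the three counts abstracted, A's selection equals B's range-fold selection
theorem final_select (a b c : Int) :
    ((if a = max (max a b) c then [(1 : Int)] else []) ++
      (if b = max (max a b) c then [2] else []) ++
      (if c = max (max a b) c then [3] else [])) =
    (PySem.List.pyRange 0 3 1).foldl
      (fun (acc : List Int) (i : Int) =>
        if PySem.List.pyGetD [a, b, c] i 0 =
            (PySem.List.max? [a, b, c] (fun y => y)).getD 0 then acc ++ [i + 1] else acc)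
      [] := by
  have h3 : PySem.List.pyRange 0 3 1 = [0, 1, 2] := by decide
  rw [h3, PySem.List.max?_id_cons]
  simp only [List.foldl_cons, List.foldl_nil, Option.getD_some]
  simp only [PySem.List.pyGetD_zero_cons]
  norm_num [PySem.List.pyGetD_ofNat', List.getD]
  split_ifs <;> simp

theorem solution_eq_alt (answers : List Int) : solution answers = solution_alt answers := by
  simp only [solution, solution_alt, List.map_cons, List.map_nil]
  -- turn B's histogram lookups into counts over the keyed list
  simp only [pv_getD_hist, PySem.Dict.getD_empty, zero_add]
  simp only [show ((List.length ([1, 2, 3, 4, 5] : List Int) : Int)) = 5 from rfl,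
      show ((List.length ([2, 1, 2, 3, 2, 4, 2, 5] : List Int) : Int)) = 8 from rfl,
      show ((List.length ([3, 3, 1, 1, 2, 2, 4, 4, 5, 5] : List Int) : Int)) = 10 from rfl]
  rw [foldl_prod3_split
        (fun s x => if x.2 = PySem.List.pyGetD [1, 2, 3, 4, 5] (PySem.Int.mod x.1 5) 0 then s + 1 else s)
        (fun s x => if x.2 = PySem.List.pyGetD [2, 1, 2, 3, 2, 4, 2, 5] (PySem.Int.mod x.1 8) 0 then s + 1 else s)
        (fun s x => if x.2 = PySem.List.pyGetD [3, 3, 1, 1, 2, 2, 4, 4, 5, 5] (PySem.Int.mod x.1 10) 0 then s + 1 else s)]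
  have e1 : (PySem.List.enumerate answers).foldl
      (fun s x => if x.2 = PySem.List.pyGetD [1, 2, 3, 4, 5] (PySem.Int.mod x.1 5) 0 then s + 1 else s) 0
      = ((PySem.List.pyRange 0 40 1).map (fun j =>
          (((PySem.List.enumerate answers).map (fun q => (PySem.Int.mod q.1 40, q.2))).count
            (j, PySem.List.pyGetD [1, 2, 3, 4, 5] (PySem.Int.mod j 5) 0) : Int))).sum := by
    have := pv_score_eq (fun j => PySem.List.pyGetD [1, 2, 3, 4, 5] (PySem.Int.mod j 5) 0)
      (PySem.List.enumerate answers) 0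
    simp only [pv_mod_mod_40 5 _ (by norm_num) (by norm_num), zero_add] at this
    exact this
  have e2 : (PySem.List.enumerate answers).foldl
      (fun s x => if x.2 = PySem.List.pyGetD [2, 1, 2, 3, 2, 4, 2, 5] (PySem.Int.mod x.1 8) 0 then s + 1 else s) 0
      = ((PySem.List.pyRange 0 40 1).map (fun j =>
          (((PySem.List.enumerate answers).map (fun q => (PySem.Int.mod q.1 40, q.2))).count
            (j, PySem.List.pyGetD [2, 1, 2, 3, 2, 4, 2, 5] (PySem.Int.mod j 8) 0) : Int))).sum := by
    have := pv_score_eq (fun j => PySem.List.pyGetD [2, 1, 2, 3, 2, 4, 2, 5] (PySem.Int.mod j 8) 0)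
      (PySem.List.enumerate answers) 0
    simp only [pv_mod_mod_40 8 _ (by norm_num) (by norm_num), zero_add] at this
    exact this
  have e3 : (PySem.List.enumerate answers).foldl
      (fun s x => if x.2 = PySem.List.pyGetD [3, 3, 1, 1, 2, 2, 4, 4, 5, 5] (PySem.Int.mod x.1 10) 0 then s + 1 else s) 0
      = ((PySem.List.pyRange 0 40 1).map (fun j =>
          (((PySem.List.enumerate answers).map (fun q => (PySem.Int.mod q.1 40, q.2))).count
            (j, PySem.List.pyGetD [3, 3, 1, 1, 2, 2, 4, 4, 5, 5] (PySem.Int.mod j 10) 0) : Int))).sum := by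
    have := pv_score_eq (fun j => PySem.List.pyGetD [3, 3, 1, 1, 2, 2, 4, 4, 5, 5] (PySem.Int.mod j 10) 0)
      (PySem.List.enumerate answers) 0
    simp only [pv_mod_mod_40 10 _ (by norm_num) (by norm_num), zero_add] at this
    exact this
  rw [e1, e2, e3]
  exact final_select _ _ _

-- ===== VERDICT =====
theorem solution_spec : Claim_equal_solution := by
  intro answers _
  unfold Spec_solution
  exact solution_eq_alt answers
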